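-- pv_equiv track=rewrite | github.com/seanyuner/LeetCode-python | 036 Valid Sudoku/036 Valid Sudoku.py | is_unit_valid
-- ===== SOURCE A (Python) =====
-- def is_unit_valid(unit):
--     a = {}
--     for i in unit:
--         if i == '.': continue
--         if i in a:
--             return False
--         a[i] = True
--     return True
-- ===== SOURCE B (Python) =====
-- def is_unit_valid(unit):
--     filled = sorted(c for c in unit if c != '.')
--     return all(x != y for x, y in zip(filled, filled[1:]))
-- ===== Notes on version B (the rewrite author's own statement) =====
-- stated objective: alternative
-- what changed: Replaces A's hash-based seen-dict scan with early exit by a sort-then-adjacent-scan: sort the non-placeholder cells, then a duplicate exists iff some adjacent pair of the sorted list is equal.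
import Mathlib
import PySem

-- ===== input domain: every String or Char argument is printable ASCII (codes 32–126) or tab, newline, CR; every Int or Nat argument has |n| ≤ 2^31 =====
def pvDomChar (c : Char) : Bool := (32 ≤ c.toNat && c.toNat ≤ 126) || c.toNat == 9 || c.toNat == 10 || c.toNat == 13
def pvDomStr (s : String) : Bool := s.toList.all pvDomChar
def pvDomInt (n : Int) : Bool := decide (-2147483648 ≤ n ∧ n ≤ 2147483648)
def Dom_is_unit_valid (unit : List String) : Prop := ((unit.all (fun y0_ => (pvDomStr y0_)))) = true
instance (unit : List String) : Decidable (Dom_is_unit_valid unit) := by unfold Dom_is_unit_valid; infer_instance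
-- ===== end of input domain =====

-- B replaces A's early-exit seen-dict scan by sort-then-adjacent-comparison (alternative algorithm; same behaviour).

-- ===== PORT A =====
-- the loop: for i in unit: skip '.', return False on a repeat, else record i in the dict
def isUnitValidGo : List String → PySem.Dict String Bool → Bool
  | [], _ => true
  | i :: rest, a =>
    if i == "." then isUnitValidGo rest a
    else if a.contains i then false
    else isUnitValidGo rest (a.insert i true)

def is_unit_valid (unit : List String) : Bool :=
  isUnitValidGo unit PySem.Dict.empty

-- ===== PORT B =====
def is_unit_valid_alt (unit : List String) : Bool :=
  let filled := PySem.List.sorted (unit.filter (fun c => !(c == "."))) (fun x => x) false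
  (filled.zip (filled.drop 1)).all (fun p => !(p.1 == p.2))

-- ===== PRECONDITION & SPEC =====
def Spec_is_unit_valid (unit : List String) (out : Bool) : Prop := out = is_unit_valid_alt unit
instance (unit : List String) (out : Bool) : Decidable (Spec_is_unit_valid unit out) := by unfold Spec_is_unit_valid; infer_instance

-- ===== CLAIM (what is proved, stated in full; the proofs are below) =====
def Claim_equal_is_unit_valid : Prop := ∀ (unit : List String), Dom_is_unit_valid unit → Spec_is_unit_valid unit (is_unit_valid unit)

-- ===== LEMMAS AND PROOFS =====

-- A's loop returns true iff the non-'.' entries are distinct and none is already in the dict.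
theorem isUnitValidGo_iff (l : List String) (a : PySem.Dict String Bool) :
    isUnitValidGo l a = true ↔
      (l.filter (fun c => !(c == "."))).Nodup ∧
      ∀ x ∈ l.filter (fun c => !(c == ".")), a.contains x = false := by
  induction l generalizing a with
  | nil => simp [isUnitValidGo]
  | cons i rest ih =>
    by_cases hdot : i = "."
    · subst hdot
      simp [isUnitValidGo, ih]
    · have hfil : (i :: rest).filter (fun c => !(c == ".")) =
          i :: rest.filter (fun c => !(c == ".")) := by
        simp [hdot]
      have hib : (i == ".") = false := beq_eq_false_iff_ne.mpr hdot
      by_cases hc : a.contains i = true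
      · rw [hfil]
        simp only [isUnitValidGo, hib, Bool.false_eq_true, if_false, if_pos hc]
        constructor
        · intro h; exact absurd h (by simp)
        · rintro ⟨-, hall⟩
          have := hall i (by simp)
          simp [hc] at this
      · have hc' : a.contains i = false := by
          cases h : a.contains i
          · rfl
          · exact absurd h hc
        rw [hfil]
        simp only [isUnitValidGo, hib, Bool.false_eq_true, if_false, if_neg hc]
        rw [ih]
        constructor
        · rintro ⟨hnd, hall⟩
          have hnotmem : i ∉ rest.filter (fun c => !(c == ".")) := by
            intro hm
            have := hall i hm
            rw [PySem.Dict.contains_insert] at this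
            simp at this
          refine ⟨List.nodup_cons.mpr ⟨hnotmem, hnd⟩, ?_⟩
          intro x hx
          rcases List.mem_cons.mp hx with rfl | hx'
          · exact hc'
          · have := hall x hx'
            rw [PySem.Dict.contains_insert] at this
            simp at this
            exact this.2
        · rintro ⟨hnd, hall⟩
          obtain ⟨hnotmem, hnd'⟩ := List.nodup_cons.mp hnd
          refine ⟨hnd', ?_⟩
          intro x hx
          rw [PySem.Dict.contains_insert]
          have hne : x ≠ i := fun h => hnotmem (h ▸ hx)
          simp [hne, hall x (List.mem_cons_of_mem _ hx)]

-- the adjacent-pairs scan is Chain' (· ≠ ·)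
theorem zipTail_all_ne_iff (l : List String) :
    ((l.zip (l.drop 1)).all (fun p => !(p.1 == p.2))) = true ↔ l.IsChain (· ≠ ·) := by
  induction l with
  | nil => simp
  | cons a t ih =>
    cases t with
    | nil => simp
    | cons b t' =>
      simp only [List.drop_one, List.tail_cons, List.zip_cons_cons, List.all_cons,
        Bool.and_eq_true, List.isChain_cons_cons] at ih ⊢
      rw [← ih]
      simp

-- on a ≤-sorted list, adjacent-distinct forces strict increase
theorem chain'_lt_of_pairwise_le_chain'_ne (l : List String)
    (h1 : l.Pairwise (· ≤ ·)) (h2 : l.IsChain (· ≠ ·)) : l.IsChain (· < ·) := by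
  induction l with
  | nil => exact List.isChain_nil
  | cons a t ih =>
    cases t with
    | nil => simp
    | cons b t' =>
      rw [List.isChain_cons_cons] at h2 ⊢
      obtain ⟨hne, h2'⟩ := h2
      have hle : a ≤ b := (List.pairwise_cons.mp h1).1 b (by simp)
      exact ⟨lt_of_le_of_ne hle hne, ih (List.pairwise_cons.mp h1).2 h2'⟩

-- adjacent-distinct on the sorted list decides Nodup of the original
theorem chain'_ne_sorted_iff_nodup (xs : List String) :
    (PySem.List.sorted xs (fun x => x) false).IsChain (· ≠ ·) ↔ xs.Nodup := by
  have hperm : (PySem.List.sorted xs (fun x => x) false).Perm xs := PySem.List.sorted_perm xs _ _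
  have hpw : (PySem.List.sorted xs (fun x => x) false).Pairwise (· ≤ ·) := by
    simpa using PySem.List.sorted_pairwise xs (fun x => x)
  constructor
  · intro h
    have hlt := chain'_lt_of_pairwise_le_chain'_ne _ hpw h
    have : (PySem.List.sorted xs (fun x => x) false).Pairwise (· < ·) :=
      (List.isChain_iff_pairwise).mp hlt
    exact hperm.nodup_iff.mp (this.imp ne_of_lt)
  · intro h
    exact (hperm.nodup_iff.mpr h).isChain

-- ===== VERDICT (by name: the statement is the Claim_ definition above) =====
theorem is_unit_valid_spec : Claim_equal_is_unit_valid := by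
  intro unit _
  unfold Spec_is_unit_valid is_unit_valid is_unit_valid_alt
  have ha : isUnitValidGo unit PySem.Dict.empty = true ↔
      (unit.filter (fun c => !(c == "."))).Nodup := by
    rw [isUnitValidGo_iff]
    simp [PySem.Dict.contains_empty]
  have hb := (zipTail_all_ne_iff (PySem.List.sorted (unit.filter (fun c => !(c == "."))) (fun x => x) false)).trans
      (chain'_ne_sorted_iff_nodup (unit.filter (fun c => !(c == "."))))
  rw [Bool.eq_iff_iff, ha]
  exact hb.symm
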